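-- pv_equiv track=rewrite | github.com/Creamery/OOTO-Miner-V5 | __CrossProcess_MP_process.py | mergeAndFilter
-- ===== SOURCE A (Python) =====
-- import collections
--
-- def mergeAndFilter(list1, list2):
--     dict1 = collections.defaultdict(list)
--
--     for e in list1 + list2:
--         dict1[e[0]].append(e[1])
--
--     merged_list = list()
--
--     for key, value in dict1.items():
--         max_value = []
--         max_value.append(max(value))
--         merged_list.append([key] + max_value)
--
--     return merged_list
-- ===== SOURCE B (Python) =====
-- def mergeAndFilter(list1, list2):
--     pairs = list1 + list2
--     keys = []
--     for e in pairs: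
--         if e[0] not in keys:
--             keys.append(e[0])
--     return [[k, max(e[1] for e in pairs if e[0] == k)] for k in keys]
-- ===== Notes on version B (the rewrite author's own statement) =====
-- stated objective: alternative
-- what changed: B drops the dict entirely: a first pass collects distinct keys in first-seen order into a list, then for each key a separate scan over all pairs takes the max of its values (staged nested scans instead of one-pass dict grouping + reduce); trades O(n) for O(n*k) time but needs no auxiliary mapping.
import Mathlib
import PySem

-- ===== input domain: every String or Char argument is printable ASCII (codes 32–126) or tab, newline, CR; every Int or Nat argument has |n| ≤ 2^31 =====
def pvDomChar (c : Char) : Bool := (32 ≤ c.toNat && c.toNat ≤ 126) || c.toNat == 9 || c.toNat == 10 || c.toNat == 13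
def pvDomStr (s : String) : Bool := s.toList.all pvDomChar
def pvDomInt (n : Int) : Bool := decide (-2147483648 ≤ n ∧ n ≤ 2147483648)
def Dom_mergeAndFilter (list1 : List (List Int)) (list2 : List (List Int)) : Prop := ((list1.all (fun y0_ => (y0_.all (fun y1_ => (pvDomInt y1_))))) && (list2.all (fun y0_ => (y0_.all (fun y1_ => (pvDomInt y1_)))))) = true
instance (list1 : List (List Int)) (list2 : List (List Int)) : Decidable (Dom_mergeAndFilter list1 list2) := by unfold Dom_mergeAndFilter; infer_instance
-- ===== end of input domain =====

-- B replaces the dict grouping with staged passes: collect distinct keys in first-seen order,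
-- then scan all pairs once per key for its maximum (objective: alternative, no auxiliary mapping).

-- ===== PORT A =====
-- for e in list1 + list2: dict1[e[0]].append(e[1])   (defaultdict(list) = modify with default [])
def mergeAndFilter (list1 : List (List Int)) (list2 : List (List Int)) : List (List Int) :=
  let dict1 := (list1 ++ list2).foldl
    (fun d e => d.modify (PySem.List.pyGetD e 0 0) [] (fun vs => vs ++ [PySem.List.pyGetD e 1 0]))
    PySem.Dict.empty
  -- for key, value in dict1.items(): merged_list.append([key] + [max(value)])
  dict1.items.foldl (fun merged p => merged ++ [[p.1] ++ [(PySem.List.max? p.2 (fun y => y)).getD 0]]) []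

-- ===== PORT B =====
def mergeAndFilter_alt (list1 : List (List Int)) (list2 : List (List Int)) : List (List Int) :=
  let pairs := list1 ++ list2
  -- for e in pairs: if e[0] not in keys: keys.append(e[0])
  let keys := pairs.foldl
    (fun ks e => if ks.contains (PySem.List.pyGetD e 0 0) then ks else ks ++ [PySem.List.pyGetD e 0 0]) []
  -- [[k, max(e[1] for e in pairs if e[0] == k)] for k in keys]   (max never sees an empty stream: k comes from pairs)
  keys.map (fun k =>
    [k, (PySem.List.max? ((pairs.filter (fun e => PySem.List.pyGetD e 0 0 == k)).map
          (fun e => PySem.List.pyGetD e 1 0)) (fun y => y)).getD 0])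

-- ===== PRECONDITION & SPEC =====
-- Pre_ excludes exactly the inputs where the Python A raises IndexError (an inner list with
-- fewer than two elements, so e[0] or e[1] fails); B raises there too.
def Pre_mergeAndFilter (list1 : List (List Int)) (list2 : List (List Int)) : Prop :=
  ∀ e ∈ list1 ++ list2, 2 ≤ e.length
instance (list1 : List (List Int)) (list2 : List (List Int)) : Decidable (Pre_mergeAndFilter list1 list2) := by unfold Pre_mergeAndFilter; infer_instance
def pvWitness_mergeAndFilter : List (List Int) × List (List Int) := ([[1, 5], [2, 3], [1, 4]], [[2, 9]])

def Spec_mergeAndFilter (list1 : List (List Int)) (list2 : List (List Int)) (out : List (List Int)) : Prop := out = mergeAndFilter_alt list1 list2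
instance (list1 : List (List Int)) (list2 : List (List Int)) (out : List (List Int)) : Decidable (Spec_mergeAndFilter list1 list2 out) := by unfold Spec_mergeAndFilter; infer_instance

-- ===== CLAIM (what is proved, stated in full; the proofs are below) =====
def Claim_equal_mergeAndFilter : Prop := ∀ (list1 : List (List Int)) (list2 : List (List Int)), Dom_mergeAndFilter list1 list2 → Pre_mergeAndFilter list1 list2 → Spec_mergeAndFilter list1 list2 (mergeAndFilter list1 list2)

-- ===== LEMMAS AND PROOFS =====

-- B's key-collecting loop is PySem.Set.update (first-seen dedup) of the keys
theorem pvKeysLoop (l : List (List Int)) (ks : List Int) :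
    l.foldl (fun ks e => if ks.contains (PySem.List.pyGetD e 0 0) then ks else ks ++ [PySem.List.pyGetD e 0 0]) ks
      = PySem.Set.update ks (l.map (fun e => PySem.List.pyGetD e 0 0)) := by
  show _ = (l.map (fun e => PySem.List.pyGetD e 0 0)).foldl PySem.Set.add ks
  rw [List.foldl_map]
  rfl

-- A's grouping loop, rewritten as a fold over (key, value) pairs
theorem pvFoldPairs (l : List (List Int)) (d : PySem.Dict Int (List Int)) :
    l.foldl (fun d e => d.modify (PySem.List.pyGetD e 0 0) [] (fun vs => vs ++ [PySem.List.pyGetD e 1 0])) d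
      = (l.map (fun e => (PySem.List.pyGetD e 0 0, PySem.List.pyGetD e 1 0))).foldl
          (fun d p => d.modify p.1 [] (fun vs => vs ++ [p.2])) d := by
  rw [List.foldl_map]

-- ===== VERDICT (by name: the statement is the Claim_ definition above) =====
theorem mergeAndFilter_spec : Claim_equal_mergeAndFilter := by
  intro list1 list2 _ _
  unfold Spec_mergeAndFilter mergeAndFilter mergeAndFilter_alt
  simp only []
  set pairs := list1 ++ list2 with hpairs
  set key : List Int → Int := fun e => PySem.List.pyGetD e 0 0 with hkey
  set dict1 := pairs.foldl
    (fun d e => d.modify (PySem.List.pyGetD e 0 0) [] (fun vs => vs ++ [PySem.List.pyGetD e 1 0]))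
    PySem.Dict.empty with hdict1
  have hnd : dict1.keys.Nodup := by
    rw [hdict1]
    exact PySem.Dict.nodup_keys_foldl_modify_key pairs key []
      (fun _ e vs => vs ++ [PySem.List.pyGetD e 1 0]) PySem.Dict.empty (by simp)
  have hkeys : dict1.keys = PySem.Set.update [] (pairs.map key) := by
    rw [hdict1]
    have := PySem.Dict.keys_foldl_modify_key pairs key []
      (fun _ e vs => vs ++ [PySem.List.pyGetD e 1 0]) PySem.Dict.empty
    simpa using this
  have hgetD : ∀ c : Int, dict1.getD c [] =
      (pairs.filter (fun e => key e == c)).map (fun e => PySem.List.pyGetD e 1 0) := by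
    intro c
    rw [hdict1, pvFoldPairs, PySem.Dict.getD_foldl_modify_append]
    simp [List.filter_map, List.map_map, Function.comp_def, hkey]
  rw [PySem.List.foldl_append_singleton_eq_map, PySem.Dict.items_eq_map_keys dict1 hnd [],
    List.map_map, hkeys, pvKeysLoop]
  refine List.map_congr_left ?_
  intro k _
  simp [hgetD k, hkey]
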